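-- pv_equiv track=rewrite | github.com/alexandraback/datacollection | solutions_5695413893988352_0/Python/cameron274/B.py | make_numbers
-- ===== SOURCE A (Python) =====
-- def get_digit(n, k):
--     return (n // (10**k)) % 10
--
-- def set_digit(n, k, d):
--     return n + (d - get_digit(n,k)) * 10**k
--
-- def make_numbers(c_int, j_int, c_blanks, j_blanks, k, b):
--     #fills in the blanks of c_int and j_int with k
--     for i in range(b):
--         if (i < len(c_blanks)):
--             c_int = set_digit(c_int, c_blanks[i], get_digit(k, b-i-1))
--         else:
--             j_int = set_digit(j_int, j_blanks[i - len(c_blanks)],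
--                 get_digit(k, b-i-1))
--     return (c_int, j_int)
-- ===== SOURCE B (Python) =====
-- def _fill(n, positions, digits):
--     # write digits (0-9) into the decimal slots `positions` of n, low part via a digit list
--     if not positions:
--         return n
--     w = max(positions) + 1
--     r = n % 10 ** w
--     ds = []                      # little-endian digits of r, length w
--     t = r
--     for _ in range(w):
--         ds.append(t % 10)
--         t //= 10
--     for p, d in zip(positions, digits):
--         ds[p] = d
--     return n - r + sum(d * 10 ** i for i, d in enumerate(ds))
--
-- def make_numbers(c_int, j_int, c_blanks, j_blanks, k, b):
--     # fills in the blanks of c_int and j_int with the b digits of k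
--     if b <= 0:
--         return (c_int, j_int)
--     K = []                       # big-endian: K[i] is digit of k at place 10**(b-1-i)
--     t = k % 10 ** b
--     for _ in range(b):
--         K.append(t % 10)
--         t //= 10
--     K.reverse()
--     nc = min(b, len(c_blanks))
--     return (_fill(c_int, c_blanks[:nc], K[:nc]),
--             _fill(j_int, j_blanks[:b - nc], K[nc:]))
-- ===== Notes on version B (the rewrite author's own statement) =====
-- stated objective: alternative
-- what changed: B replaces A's interleaved loop of per-position modular digit surgery (set_digit/get_digit arithmetic on each iteration) by computing the digit list of k once, splitting the blanks into the two numbers' position lists, and for each number batch-assigning digits into the decimal digit list of its low part and re-summing positionally.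
-- outside the precondition, e.g. on make_numbers(5, 0, [-1], [], 1, 1): A returns (4.2, 0), B raises IndexError; on make_numbers(0, 0, [], [], 7, 1): A raises IndexError, B returns (0, 0)
import Mathlib
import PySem

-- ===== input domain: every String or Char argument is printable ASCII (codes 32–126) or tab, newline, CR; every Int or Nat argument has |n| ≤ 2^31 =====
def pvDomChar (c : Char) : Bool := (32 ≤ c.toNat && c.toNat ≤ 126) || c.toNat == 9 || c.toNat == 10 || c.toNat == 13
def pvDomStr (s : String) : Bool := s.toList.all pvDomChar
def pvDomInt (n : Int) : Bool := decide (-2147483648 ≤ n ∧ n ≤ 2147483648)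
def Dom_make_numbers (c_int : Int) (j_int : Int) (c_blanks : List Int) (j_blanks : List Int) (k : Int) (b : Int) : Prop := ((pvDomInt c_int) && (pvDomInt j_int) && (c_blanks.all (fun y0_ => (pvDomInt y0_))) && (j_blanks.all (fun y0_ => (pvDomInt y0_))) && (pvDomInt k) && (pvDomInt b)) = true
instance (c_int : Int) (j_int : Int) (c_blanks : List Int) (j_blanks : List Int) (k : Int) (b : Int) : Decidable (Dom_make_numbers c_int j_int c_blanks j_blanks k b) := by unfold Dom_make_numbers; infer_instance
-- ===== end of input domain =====

-- B replaces A's per-position modular digit surgery by building the decimal digit list of each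
-- number's low part once, batch-assigning the digits of k into the blank slots, and re-summing
-- (objective: alternative — positional list assembly instead of repeated arithmetic digit updates).

-- ===== PORT A =====
def get_digit (n : Int) (k : Int) : Int :=
  PySem.Int.mod (PySem.Int.floordiv n (10 ^ k.toNat)) 10

def set_digit (n : Int) (k : Int) (d : Int) : Int :=
  n + (d - get_digit n k) * 10 ^ k.toNat

def make_numbers (c_int : Int) (j_int : Int) (c_blanks : List Int) (j_blanks : List Int) (k : Int) (b : Int) : Int × Int :=
  (PySem.List.pyRange 0 b 1).foldl
    (fun (st : Int × Int) i =>
      if i < (c_blanks.length : Int) then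
        (set_digit st.1 (PySem.List.pyGetD c_blanks i 0) (get_digit k (b - i - 1)), st.2)
      else
        (st.1, set_digit st.2 (PySem.List.pyGetD j_blanks (i - (c_blanks.length : Int)) 0) (get_digit k (b - i - 1))))
    (c_int, j_int)

-- ===== PORT B =====
-- the `for _ in range(m): ds.append(t % 10); t //= 10` loop of Source B
def digitsLoop : Nat → Int → List Int → List Int
  | 0, _, ds => ds
  | m + 1, t, ds => digitsLoop m (PySem.Int.floordiv t 10) (ds ++ [PySem.Int.mod t 10])

-- `sum(d * 10 ** i for i, d in enumerate(ds))`
def sumEnum (ds : List Int) : Int :=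
  (PySem.List.enumerate ds 0).foldl (fun s p => s + p.2 * 10 ^ p.1.toNat) 0

-- `_fill` of Source B
def fillB (n : Int) (positions : List Int) (digits : List Int) : Int :=
  if positions = [] then n
  else
    let w : Nat := (((PySem.List.max? positions id).getD 0) + 1).toNat
    let r : Int := PySem.Int.mod n (10 ^ w)
    let ds : List Int := digitsLoop w r []
    let ds2 : List Int := (positions.zip digits).foldl (fun l pd => PySem.List.pySetD l pd.1 pd.2) ds
    n - r + sumEnum ds2

def make_numbers_alt (c_int : Int) (j_int : Int) (c_blanks : List Int) (j_blanks : List Int) (k : Int) (b : Int) : Int × Int :=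
  if b ≤ 0 then (c_int, j_int)
  else
    let K : List Int := (digitsLoop b.toNat (PySem.Int.mod k (10 ^ b.toNat)) []).reverse
    let nc : Nat := min b.toNat c_blanks.length
    (fillB c_int (c_blanks.take nc) (K.take nc),
     fillB j_int (j_blanks.take (b.toNat - nc)) (K.drop nc))

-- ===== PRECONDITION & SPEC =====
-- Pre_ excludes (a) b > len(c_blanks)+len(j_blanks), where A raises IndexError, and (b) a negative
-- blank position among the positions the loop actually uses, where A's 10**k is a float and A
-- returns a float, not an int.
def Pre_make_numbers (c_int : Int) (j_int : Int) (c_blanks : List Int) (j_blanks : List Int) (k : Int) (b : Int) : Prop :=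
  b ≤ (c_blanks.length : Int) + (j_blanks.length : Int) ∧
  (∀ p ∈ c_blanks.take b.toNat, 0 ≤ p) ∧
  (∀ p ∈ j_blanks.take (b - (c_blanks.length : Int)).toNat, 0 ≤ p)

instance (c_int : Int) (j_int : Int) (c_blanks : List Int) (j_blanks : List Int) (k : Int) (b : Int) : Decidable (Pre_make_numbers c_int j_int c_blanks j_blanks k b) := by unfold Pre_make_numbers; infer_instance

def pvWitness_make_numbers : Int × Int × List Int × List Int × Int × Int := (305, 27, [1, 0], [2], 741, 3)

def Spec_make_numbers (c_int : Int) (j_int : Int) (c_blanks : List Int) (j_blanks : List Int) (k : Int) (b : Int) (out : Int × Int) : Prop := out = make_numbers_alt c_int j_int c_blanks j_blanks k b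
instance (c_int : Int) (j_int : Int) (c_blanks : List Int) (j_blanks : List Int) (k : Int) (b : Int) (out : Int × Int) : Decidable (Spec_make_numbers c_int j_int c_blanks j_blanks k b out) := by unfold Spec_make_numbers; infer_instance

-- ===== CLAIM (what is proved, stated in full; the proofs are below) =====
def Claim_equal_make_numbers : Prop := ∀ (c_int : Int) (j_int : Int) (c_blanks : List Int) (j_blanks : List Int) (k : Int) (b : Int), Dom_make_numbers c_int j_int c_blanks j_blanks k b → Pre_make_numbers c_int j_int c_blanks j_blanks k b → Spec_make_numbers c_int j_int c_blanks j_blanks k b (make_numbers c_int j_int c_blanks j_blanks k b)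

-- ===== LEMMAS AND PROOFS =====

-- little-endian value of a digit list
def pvVal : List Int → Int
  | [] => 0
  | d :: t => d + 10 * pvVal t

-- structural form of digitsLoop
def pvDigs : Nat → Int → List Int
  | 0, _ => []
  | m + 1, t => PySem.Int.mod t 10 :: pvDigs m (PySem.Int.floordiv t 10)

lemma digitsLoop_eq (m : Nat) : ∀ (t : Int) (ds : List Int), digitsLoop m t ds = ds ++ pvDigs m t := by
  induction m with
  | zero => intro t ds; simp [digitsLoop, pvDigs]
  | succ m ih => intro t ds; simp [digitsLoop, pvDigs, ih]

lemma length_pvDigs (m : Nat) : ∀ t, (pvDigs m t).length = m := by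
  induction m with
  | zero => intro t; simp [pvDigs]
  | succ m ih => intro t; simp [pvDigs, ih]

lemma mem_pvDigs (m : Nat) : ∀ t, ∀ d ∈ pvDigs m t, 0 ≤ d ∧ d < 10 := by
  induction m with
  | zero => intro t d hd; simp [pvDigs] at hd
  | succ m ih =>
    intro t d hd
    simp only [pvDigs, List.mem_cons] at hd
    rcases hd with h | h
    · subst h; exact ⟨PySem.Int.mod_nonneg _ (by norm_num), PySem.Int.mod_lt _ (by norm_num)⟩
    · exact ih _ d h

lemma val_pvDigs (m : Nat) : ∀ t : Int, 0 ≤ t → t < 10 ^ m → pvVal (pvDigs m t) = t := by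
  induction m with
  | zero => intro t h0 h1; simp [pvDigs, pvVal]; omega
  | succ m ih =>
    intro t h0 h1
    have hd : PySem.Int.floordiv t 10 = t / 10 := PySem.Int.floordiv_eq_ediv_of_pos (by norm_num)
    have hm : PySem.Int.mod t 10 = t % 10 := PySem.Int.mod_eq_emod_of_pos (by norm_num)
    have h2 : 0 ≤ t / 10 := Int.ediv_nonneg h0 (by norm_num)
    have h3 : t / 10 < 10 ^ m := by
      rw [Int.ediv_lt_iff_lt_mul (by norm_num)]
      calc t < 10 ^ (m + 1) := h1
        _ = 10 ^ m * 10 := by ring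
    simp only [pvDigs, pvVal, hd, hm, ih _ h2 h3]
    omega

lemma getD_pvDigs (m : Nat) : ∀ (t : Int) (j : Nat), j < m →
    (pvDigs m t).getD j 0 = PySem.Int.mod (PySem.Int.floordiv t (10 ^ j)) 10 := by
  induction m with
  | zero => intro t j hj; omega
  | succ m ih =>
    intro t j hj
    cases j with
    | zero =>
      have : PySem.Int.floordiv t (10 ^ 0) = t := by
        rw [PySem.Int.floordiv_eq_ediv_of_pos (by norm_num)]; simp
      simp [pvDigs]
    | succ j =>
      have h1 : PySem.Int.floordiv (PySem.Int.floordiv t 10) (10 ^ j) = PySem.Int.floordiv t (10 ^ (j + 1)) := by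
        rw [PySem.Int.floordiv_eq_ediv_of_pos (show (0:Int) < 10 by norm_num),
            PySem.Int.floordiv_eq_ediv_of_pos (show (0:Int) < 10 ^ j by positivity),
            PySem.Int.floordiv_eq_ediv_of_pos (show (0:Int) < 10 ^ (j+1) by positivity),
            Int.ediv_ediv_of_nonneg (by norm_num)]
        ring_nf
      simp only [pvDigs, List.getD_cons_succ]
      rw [ih _ j (by omega), h1]

-- value of a digit list is within [0, 10^length)
lemma val_bounds (ds : List Int) (h : ∀ d ∈ ds, 0 ≤ d ∧ d < 10) :
    0 ≤ pvVal ds ∧ pvVal ds < 10 ^ ds.length := by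
  induction ds with
  | nil => simp [pvVal]
  | cons d t ih =>
    have hd := h d (by simp)
    have ht := ih (fun x hx => h x (by simp [hx]))
    simp only [pvVal, List.length_cons]
    constructor
    · omega
    · have : pvVal t ≤ 10 ^ t.length - 1 := by omega
      calc d + 10 * pvVal t ≤ 9 + 10 * (10 ^ t.length - 1) := by omega
        _ < 10 ^ (t.length + 1) := by rw [pow_succ]; omega

lemma val_set (ds : List Int) : ∀ (p : Nat) (d : Int), p < ds.length →
    pvVal (ds.set p d) = pvVal ds + (d - ds.getD p 0) * 10 ^ p := by
  induction ds with
  | nil => intro p d hp; simp at hp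
  | cons x t ih =>
    intro p d hp
    cases p with
    | zero => simp [pvVal]; ring
    | succ p =>
      simp only [List.set_cons_succ, pvVal, List.getD_cons_succ]
      rw [ih p d (by simpa using hp)]
      ring

-- digit extraction from a digit-list value
lemma digit_of_val (ds : List Int) : ∀ (p : Nat), p < ds.length → (∀ d ∈ ds, 0 ≤ d ∧ d < 10) →
    PySem.Int.mod (PySem.Int.floordiv (pvVal ds) (10 ^ p)) 10 = ds.getD p 0 := by
  induction ds with
  | nil => intro p hp; simp at hp
  | cons x t ih =>
    intro p hp h
    have hx := h x (by simp)
    cases p with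
    | zero =>
      have hv := val_bounds t (fun d hd => h d (by simp [hd]))
      rw [PySem.Int.floordiv_eq_ediv_of_pos (show (0:Int) < 10 ^ 0 by norm_num),
          PySem.Int.mod_eq_emod_of_pos (by norm_num)]
      simp only [pvVal, pow_zero, Int.ediv_one, List.getD_cons_zero]
      rw [show x + 10 * pvVal t = x + pvVal t * 10 by ring, Int.add_mul_emod_self_right]
      exact Int.emod_eq_of_lt hx.1 hx.2
    | succ p =>
      have h1 : PySem.Int.floordiv (pvVal (x :: t)) (10 ^ (p + 1)) = PySem.Int.floordiv (pvVal t) (10 ^ p) := by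
        rw [PySem.Int.floordiv_eq_ediv_of_pos (show (0:Int) < 10 ^ (p+1) by positivity),
            PySem.Int.floordiv_eq_ediv_of_pos (show (0:Int) < 10 ^ p by positivity)]
        have : pvVal (x :: t) = x + pvVal t * 10 := by simp [pvVal]; ring
        rw [this, show (10:Int) ^ (p+1) = 10 * 10 ^ p by ring,
            ← Int.ediv_ediv_of_nonneg (by norm_num : (0:Int) ≤ 10),
            Int.add_mul_ediv_right _ _ (by norm_num : (10:Int) ≠ 0),
            Int.ediv_eq_zero_of_lt hx.1 hx.2]
        simp
      rw [h1, List.getD_cons_succ]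
      exact ih p (by simpa using hp) (fun d hd => h d (by simp [hd]))

-- window: the digit of n at place p only depends on n mod 10^w for p < w
lemma get_digit_window (n : Int) (p w : Nat) (hpw : p < w) :
    get_digit n p = PySem.Int.mod (PySem.Int.floordiv (PySem.Int.mod n (10 ^ w)) (10 ^ p)) 10 := by
  have hM : (0:Int) < 10 ^ w := by positivity
  have hp10 : (0:Int) < 10 ^ p := by positivity
  rw [get_digit]
  simp only [Int.toNat_natCast]
  rw [PySem.Int.mod_eq_emod_of_pos hM,
      PySem.Int.floordiv_eq_ediv_of_pos hp10,
      PySem.Int.floordiv_eq_ediv_of_pos hp10,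
      PySem.Int.mod_eq_emod_of_pos (show (0:Int) < 10 by norm_num),
      PySem.Int.mod_eq_emod_of_pos (show (0:Int) < 10 by norm_num)]
  have hsplit : (10:Int) ^ (w - p - 1) * 10 * 10 ^ p = 10 ^ w := by
    rw [mul_assoc, show (10:Int) * 10 ^ p = 10 ^ (p + 1) by ring, ← pow_add]
    congr 1; omega
  have hn : n = n % 10 ^ w + (n / 10 ^ w * (10 ^ (w - p - 1) * 10)) * 10 ^ p := by
    rw [mul_assoc, hsplit]
    have := Int.emod_add_mul_ediv n (10 ^ w)
    linarith
  calc n / 10 ^ p % 10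
      = (n % 10 ^ w + (n / 10 ^ w * (10 ^ (w - p - 1) * 10)) * 10 ^ p) / 10 ^ p % 10 := by rw [← hn]
    _ = (n % 10 ^ w / 10 ^ p + n / 10 ^ w * (10 ^ (w - p - 1) * 10)) % 10 := by
        rw [Int.add_mul_ediv_right _ _ (ne_of_gt hp10)]
    _ = (n % 10 ^ w / 10 ^ p + (n / 10 ^ w * 10 ^ (w - p - 1)) * 10) % 10 := by ring_nf
    _ = n % 10 ^ w / 10 ^ p % 10 := Int.add_mul_emod_self_right _ _ _

-- get_digit only sees the index through toNat
lemma get_digit_congr (n : Int) {x y : Int} (h : x.toNat = y.toNat) : get_digit n x = get_digit n y := by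
  simp [get_digit, h]

-- the core invariant: A's fold of set_digit equals B's fold of list assignments
lemma fold_set_digit (w : Nat) (pairs : List (Int × Int)) : ∀ (ds : List Int) (n : Int),
    ds.length = w → (∀ d ∈ ds, 0 ≤ d ∧ d < 10) →
    (∀ pd ∈ pairs, 0 ≤ pd.1 ∧ pd.1.toNat < w ∧ 0 ≤ pd.2 ∧ pd.2 < 10) →
    PySem.Int.mod n (10 ^ w) = pvVal ds →
    pairs.foldl (fun v pd => set_digit v pd.1 pd.2) n
      = n - pvVal ds + pvVal (pairs.foldl (fun l pd => PySem.List.pySetD l pd.1 pd.2) ds) := by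
  induction pairs with
  | nil => intro ds n _ _ _ _; simp
  | cons pd rest ih =>
    intro ds n hlen hent hpairs hmod
    obtain ⟨hp0, hpw, hd0, hd10⟩ := hpairs pd (List.mem_cons_self ..)
    have hM : (0:Int) < 10 ^ w := by positivity
    simp only [List.foldl_cons]
    have hset : PySem.List.pySetD ds pd.1 pd.2 = ds.set pd.1.toNat pd.2 :=
      PySem.List.pySetD_of_nonneg _ _ hp0
    have hg : get_digit n pd.1 = ds.getD pd.1.toNat 0 := by
      have h1 : get_digit n pd.1 = get_digit n (pd.1.toNat : Int) := get_digit_congr n (by omega)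
      rw [h1, get_digit_window n pd.1.toNat w hpw, hmod,
          digit_of_val ds pd.1.toNat (by omega) hent]
    have hlt : pd.1.toNat < ds.length := by omega
    have hsd : set_digit n pd.1 pd.2 = n - pvVal ds + pvVal (ds.set pd.1.toNat pd.2) := by
      rw [val_set ds pd.1.toNat pd.2 hlt, set_digit, hg]; ring
    have hent' : ∀ d ∈ ds.set pd.1.toNat pd.2, 0 ≤ d ∧ d < 10 := by
      intro d hd
      rcases List.mem_or_eq_of_mem_set hd with h | h
      · exact hent d h
      · subst h; exact ⟨hd0, hd10⟩
    have hlen' : (ds.set pd.1.toNat pd.2).length = w := by simp [hlen]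
    have hbounds := val_bounds (ds.set pd.1.toNat pd.2) hent'
    have hmod' : PySem.Int.mod (set_digit n pd.1 pd.2) (10 ^ w) = pvVal (ds.set pd.1.toNat pd.2) := by
      rw [PySem.Int.mod_eq_emod_of_pos hM]
      have hnm : n % 10 ^ w = pvVal ds := by rw [← PySem.Int.mod_eq_emod_of_pos hM]; exact hmod
      have : set_digit n pd.1 pd.2
          = pvVal (ds.set pd.1.toNat pd.2) + (n / 10 ^ w) * 10 ^ w := by
        rw [hsd]
        have := Int.emod_add_mul_ediv n (10 ^ w)
        linarith
      rw [this, Int.add_mul_emod_self_right]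
      exact Int.emod_eq_of_lt hbounds.1 (hlen' ▸ hbounds.2)
    rw [hset, ih (ds.set pd.1.toNat pd.2) (set_digit n pd.1 pd.2) hlen' hent'
        (fun x hx => hpairs x (List.mem_cons_of_mem _ hx)) hmod', hsd]
    ring

-- sumEnum is pvVal
lemma sumEnum_aux (ds : List Int) : ∀ (s : Nat) (acc : Int),
    (PySem.List.enumerate ds (s:Int)).foldl (fun a p => a + p.2 * 10 ^ p.1.toNat) acc
      = acc + 10 ^ s * pvVal ds := by
  induction ds with
  | nil => intro s acc; simp [PySem.List.enumerate, pvVal]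
  | cons d t ih =>
    intro s acc
    rw [PySem.List.enumerate_cons]
    simp only [List.foldl_cons]
    have hs : ((s:Int) + 1) = ((s + 1 : Nat) : Int) := by push_cast; ring
    rw [hs, ih (s+1)]
    simp only [Int.toNat_natCast, pvVal, pow_succ]
    ring

lemma sumEnum_eq_val (ds : List Int) : sumEnum ds = pvVal ds := by
  have h := sumEnum_aux ds 0 0
  simpa [sumEnum] using h

-- a nonempty list has a maximum
lemma pvMax?_some (ps : List Int) (h : ps ≠ []) : ∃ m, PySem.List.max? ps id = some m := by
  unfold PySem.List.max?
  cases ps with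
  | nil => simp at h
  | cons x t =>
    clear h
    induction t generalizing x with
    | nil => simp
    | cons y t ih =>
      simp only [List.foldl_cons]
      by_cases hxy : x < y
      · simpa [hxy] using ih y
      · simpa [hxy] using ih x

-- fillB is A's fold of set_digit over the (position, digit) pairs
lemma fillB_eq (n : Int) (ps digs : List Int)
    (hp : ∀ p ∈ ps, 0 ≤ p) (hd : ∀ d ∈ digs, 0 ≤ d ∧ d < 10) :
    fillB n ps digs = (ps.zip digs).foldl (fun v pd => set_digit v pd.1 pd.2) n := by
  by_cases hps : ps = []
  · simp [fillB, hps]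
  · obtain ⟨m, hm⟩ := pvMax?_some ps hps
    have hmem : m ∈ ps := PySem.List.max?_mem hm
    have hm0 : 0 ≤ m := hp m hmem
    rw [fillB, if_neg hps]
    simp only [hm, Option.getD_some]
    set w : Nat := (m + 1).toNat with hw
    have hMpos : (0:Int) < 10 ^ w := by positivity
    set r : Int := PySem.Int.mod n (10 ^ w) with hr
    have hds : digitsLoop w r [] = pvDigs w r := by rw [digitsLoop_eq]; simp
    have hr0 : 0 ≤ r := PySem.Int.mod_nonneg n hMpos
    have hr1 : r < 10 ^ w := PySem.Int.mod_lt n hMpos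
    have hval : pvVal (pvDigs w r) = r := val_pvDigs w r hr0 hr1
    rw [hds, fold_set_digit w (ps.zip digs) (pvDigs w r) n (length_pvDigs w r)
        (mem_pvDigs w r)
        (by
          intro pd hpd
          obtain ⟨h1, h2⟩ := List.of_mem_zip hpd
          have hple := PySem.List.max?_isMax hm pd.1 h1
          have hdd := hd pd.2 h2
          exact ⟨hp pd.1 h1, by simp only [id] at hple; omega, hdd.1, hdd.2⟩)
        (by rw [hval]), hval, sumEnum_eq_val]

-- A's loop acting on the first component only
lemma foldA_first (cb jb : List Int) (k b : Int) (l : List Int)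
    (h : ∀ i ∈ l, i < (cb.length : Int)) : ∀ (c j : Int),
    l.foldl (fun (st : Int × Int) i =>
      if i < (cb.length : Int) then
        (set_digit st.1 (PySem.List.pyGetD cb i 0) (get_digit k (b - i - 1)), st.2)
      else
        (st.1, set_digit st.2 (PySem.List.pyGetD jb (i - (cb.length : Int)) 0) (get_digit k (b - i - 1)))) (c, j)
    = (l.foldl (fun c i => set_digit c (PySem.List.pyGetD cb i 0) (get_digit k (b - i - 1))) c, j) := by
  induction l with
  | nil => intro c j; simp
  | cons x t ih =>
    intro c j
    simp only [List.foldl_cons, if_pos (h x (List.mem_cons_self ..))]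
    exact ih (fun i hi => h i (List.mem_cons_of_mem _ hi)) _ j

-- A's loop acting on the second component only
lemma foldA_second (cb jb : List Int) (k b : Int) (l : List Int)
    (h : ∀ i ∈ l, ¬ i < (cb.length : Int)) : ∀ (c j : Int),
    l.foldl (fun (st : Int × Int) i =>
      if i < (cb.length : Int) then
        (set_digit st.1 (PySem.List.pyGetD cb i 0) (get_digit k (b - i - 1)), st.2)
      else
        (st.1, set_digit st.2 (PySem.List.pyGetD jb (i - (cb.length : Int)) 0) (get_digit k (b - i - 1)))) (c, j)
    = (c, l.foldl (fun j i => set_digit j (PySem.List.pyGetD jb (i - (cb.length : Int)) 0) (get_digit k (b - i - 1))) j) := by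
  induction l with
  | nil => intro c j; simp
  | cons x t ih =>
    intro c j
    simp only [List.foldl_cons, if_neg (h x (List.mem_cons_self ..))]
    exact ih (fun i hi => h i (List.mem_cons_of_mem _ hi)) c _

-- ===== VERDICT (by name: the statement is the Claim_ definition above) =====
theorem make_numbers_spec : Claim_equal_make_numbers := by
  intro c_int j_int cb jb k b _hdom hpre
  obtain ⟨hlen, hcpos, hjpos⟩ := hpre
  unfold Spec_make_numbers
  by_cases hb : b ≤ 0
  · rw [make_numbers_alt, if_pos hb, make_numbers, PySem.List.pyRange_one_eq_nil hb]
    simp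
  · have h0b : 0 < b := by omega
    have hbt : ((b.toNat : Int)) = b := by omega
    set L : Nat := cb.length with hL
    set nc : Nat := min b.toNat L with hnc
    have hncb : nc ≤ b.toNat := by omega
    have hncL : nc ≤ L := by omega
    -- the digit list of k
    have hK : digitsLoop b.toNat (PySem.Int.mod k (10 ^ b.toNat)) [] = pvDigs b.toNat (PySem.Int.mod k (10 ^ b.toNat)) := by
      rw [digitsLoop_eq]; simp
    set R : Int := PySem.Int.mod k (10 ^ b.toNat) with hR
    set K : List Int := (pvDigs b.toNat R).reverse with hKdef
    have hKlen : K.length = b.toNat := by simp [hKdef, length_pvDigs]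
    have hKmem : ∀ d ∈ K, 0 ≤ d ∧ d < 10 := by
      intro d hd; exact mem_pvDigs _ _ d (List.mem_reverse.mp hd)
    -- each entry of K is the corresponding digit of k
    have hKelem : ∀ (i : Nat) (hi : i < b.toNat) (x : Int), x.toNat = b.toNat - 1 - i →
        K[i]'(by omega) = get_digit k x := by
      intro i hi x hx
      have h1 : K[i]'(by omega) = (pvDigs b.toNat R)[b.toNat - 1 - i]'(by simp [length_pvDigs]; omega) := by
        simp [hKdef, List.getElem_reverse, length_pvDigs]
      have h2 : (pvDigs b.toNat R)[b.toNat - 1 - i]'(by simp [length_pvDigs]; omega)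
          = (pvDigs b.toNat R).getD (b.toNat - 1 - i) 0 := by
        rw [List.getD_eq_getElem _ _ (by simp [length_pvDigs]; omega)]
      rw [h1, h2, getD_pvDigs _ _ _ (by omega),
          get_digit_congr k (show x.toNat = (((b.toNat - 1 - i : Nat) : Int)).toNat by simp [hx]),
          get_digit_window k (b.toNat - 1 - i) b.toNat (by omega)]
    -- split A's loop
    have hmem1 : ∀ i ∈ PySem.List.pyRange 0 (nc:Int) 1, i < ((cb.length:Nat) : Int) := by
      intro i hi
      rw [PySem.List.mem_pyRange_one] at hi
      omega
    have hmem2 : ∀ i ∈ PySem.List.pyRange (nc:Int) b 1, ¬ i < ((cb.length:Nat) : Int) := by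
      intro i hi
      rw [PySem.List.mem_pyRange_one] at hi
      omega
    rw [make_numbers, PySem.List.pyRange_one_append 0 (nc : Int) b (by positivity) (by omega),
        List.foldl_append,
        foldA_first cb jb k b _ hmem1 c_int j_int,
        foldA_second cb jb k b _ hmem2]
    simp only [make_numbers_alt, if_neg (show ¬ b ≤ 0 by omega), hK, ← hR, ← hKdef, ← hL, ← hnc]
    rw [Prod.mk.injEq]
    refine ⟨?_, ?_⟩
    · -- c component
      have hsubc : cb.take nc ⊆ cb.take b.toNat := by
        have heq : cb.take nc = (cb.take b.toNat).take nc := by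
          rw [List.take_take]; congr 1; omega
        rw [heq]; exact List.take_subset _ _
      rw [fillB_eq c_int (cb.take nc) (K.take nc)
          (fun p hp => hcpos p (hsubc hp))
          (fun d hd => hKmem d (List.take_subset _ _ hd))]
      have hlist : (cb.take nc).zip (K.take nc)
          = (PySem.List.pyRange 0 (nc:Int) 1).map
              (fun i => (PySem.List.pyGetD cb i 0, get_digit k (b - i - 1))) := by
        apply List.ext_getElem
        · simp [List.length_zip, List.length_take, hKlen, PySem.List.length_pyRange_one]
          omega
        · intro i h1 h2
          have hi : i < nc := by
            simp [List.length_zip, List.length_take, hKlen] at h1; omega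
          have hiL : i < L := by omega
          simp only [List.getElem_zip, List.getElem_take, List.getElem_map,
            PySem.List.getElem_pyRange_one, zero_add]
          refine Prod.ext ?_ ?_
          · simp only [PySem.List.pyGetD_natCast]
            exact (List.getD_eq_getElem cb 0 (by omega)).symm
          · exact hKelem i (by omega) (b - (i:Int) - 1) (by omega)
      rw [hlist, List.foldl_map]
    · -- j component
      by_cases hcase : b.toNat ≤ L
      · have hnceq : nc = b.toNat := by omega
        rw [PySem.List.pyRange_one_eq_nil (by omega), hnceq]
        simp [fillB]
      · have hnceq : nc = L := by omega
        have hjlen : b.toNat - nc ≤ jb.length := by omega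
        have htake : jb.take (b.toNat - nc) = jb.take (b - (L:Int)).toNat := by
          congr 1; omega
        rw [fillB_eq j_int (jb.take (b.toNat - nc)) (K.drop nc)
            (fun p hp => hjpos p (htake ▸ hp))
            (fun d hd => hKmem d (List.drop_subset _ _ hd))]
        have hlist : (jb.take (b.toNat - nc)).zip (K.drop nc)
            = (PySem.List.pyRange (nc:Int) b 1).map
                (fun i => (PySem.List.pyGetD jb (i - (L:Int)) 0, get_digit k (b - i - 1))) := by
          apply List.ext_getElem
          · simp [List.length_zip, List.length_take, hKlen, PySem.List.length_pyRange_one]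
            omega
          · intro i h1 h2
            have hi : i < b.toNat - nc := by
              simp [List.length_zip, List.length_take, hKlen] at h1; omega
            simp only [List.getElem_zip, List.getElem_take, List.getElem_map,
              PySem.List.getElem_pyRange_one, List.getElem_drop]
            refine Prod.ext ?_ ?_
            · have harg : ((nc:Int) + (i:Int) - (L:Int)) = ((i:Nat):Int) := by omega
              rw [harg]
              simp only [PySem.List.pyGetD_natCast]
              exact (List.getD_eq_getElem jb 0 (by omega)).symm
            · exact hKelem (nc + i) (by omega) (b - ((nc:Int) + (i:Int)) - 1) (by omega)
        rw [hlist, List.foldl_map]
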